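-- pv_equiv track=rewrite | github.com/tishchennko/EGE | 23-задание ЕГЭ/dz/101104.py | f
-- ===== SOURCE A (Python) =====
-- def f(x, end):
--     if x > end:
--         return 0
--     if x == 11:
--         return 0
--     if x == end:
--         return 1
--     return f(x + 1, end) + f(x*2, end) + f(x **2, end)
-- ===== SOURCE B (Python) =====
-- def f(x, end):
--     if x > end:
--         return 0
--     dp = []  # dp[i] = number of admissible paths from the value end - i to end
--     for i in range(end - x + 1):
--         v = end - i
--         if v == 11:
--             ways = 0
--         elif i == 0:
--             ways = 1
--         else:
--             ways = dp[i - 1]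
--             if v < v * 2 <= end:
--                 ways += dp[end - v * 2]
--             if v < v * v <= end:
--                 ways += dp[end - v * v]
--         dp.append(ways)
--     return dp[end - x]
-- ===== Notes on version B (the rewrite author's own statement) =====
-- stated objective: faster
-- what changed: Replaced A's triple-branching recursion by a single bottom-up dynamic-programming loop that fills a dict dp[v] for v = end down to x and returns dp[x].
import Mathlib
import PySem

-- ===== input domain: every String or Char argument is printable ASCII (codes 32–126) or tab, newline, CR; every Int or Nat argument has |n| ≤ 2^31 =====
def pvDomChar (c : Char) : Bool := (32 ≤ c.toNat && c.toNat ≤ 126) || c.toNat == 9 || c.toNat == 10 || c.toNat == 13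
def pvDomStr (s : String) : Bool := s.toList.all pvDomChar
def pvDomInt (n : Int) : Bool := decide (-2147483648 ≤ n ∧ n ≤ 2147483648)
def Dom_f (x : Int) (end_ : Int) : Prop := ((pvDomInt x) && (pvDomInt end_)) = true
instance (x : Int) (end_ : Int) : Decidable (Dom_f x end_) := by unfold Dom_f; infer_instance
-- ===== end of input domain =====

-- B replaces A's triple-branching recursion by a single bottom-up array DP over the values
-- end_ down to x, intended to be faster (one dp entry per value instead of one call per path).

-- ===== PORT A =====
-- A's recursion never reaches a base case for x < end with x ≤ 1 (Python raises
-- RecursionError there; excluded by Pre_f below).  The port makes that divergence a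
-- terminating computation with two guards A's own algorithm never reaches on Pre_f:
-- the fuel (end_ - x).toNat + 1, which is enough for every Pre_f input (each recursive
-- call increases x by at least 1 there), and a 0 at x < 2 on the recursive branch
-- (exactly the diverging states).  On Pre_f inputs fGoA is A's recursion step for step.
def fGoA (fuel : Nat) (x : Int) (end_ : Int) : Int :=
  match fuel with
  | 0 => 0  -- unreachable on Pre_f
  | fuel + 1 =>
    if x > end_ then 0
    else if x = 11 then 0
    else if x = end_ then 1
    else if x < 2 then 0  -- divergence cut; unreachable on (and from) Pre_f inputs
    else fGoA fuel (x + 1) end_ + fGoA fuel (x * 2) end_ + fGoA fuel (x ^ 2) end_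

def f (x : Int) (end_ : Int) : Int := fGoA ((end_ - x).toNat + 1) x end_

-- ===== PORT B =====
-- one loop step of Source B: dp holds dp[j] = paths from the value end_ - j for j < i,
-- and the step appends dp[i], the count for v = end_ - i.  All indices read are < i
-- (proved below), so the `!` lookups never hit the default.
def fAltStep (end_ : Int) (dp : Array Int) (i : Nat) : Array Int :=
  let v : Int := end_ - (i : Int)
  let ways : Int :=
    if v = 11 then 0
    else if i = 0 then 1
    else
      dp[i - 1]!
      + (if v < v * 2 ∧ v * 2 ≤ end_ then dp[(end_ - v * 2).toNat]! else 0)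
      + (if v < v * v ∧ v * v ≤ end_ then dp[(end_ - v * v).toNat]! else 0)
  dp.push ways

-- dp after the whole loop `for i in range(end - x + 1)`
def fAltDP (x : Int) (end_ : Int) : Array Int :=
  (List.range (end_ - x + 1).toNat).foldl (fAltStep end_) #[]

def f_alt (x : Int) (end_ : Int) : Int :=
  if x > end_ then 0
  else (fAltDP x end_)[(end_ - x).toNat]!

-- ===== PRECONDITION & SPEC =====
-- Pre_f excludes exactly the inputs (x < end and x ≤ 1) on which A's recursion never
-- reaches a base case and Python raises RecursionError; A returns on every other input.
def Pre_f (x : Int) (end_ : Int) : Prop := 2 ≤ x ∨ end_ ≤ x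
instance (x : Int) (end_ : Int) : Decidable (Pre_f x end_) := by unfold Pre_f; infer_instance
def pvWitness_f : Int × Int := (2, 20)
def Spec_f (x : Int) (end_ : Int) (out : Int) : Prop := out = f_alt x end_
instance (x : Int) (end_ : Int) (out : Int) : Decidable (Spec_f x end_ out) := by unfold Spec_f; infer_instance

-- ===== CLAIM (what is proved, stated in full; the proofs are below) =====
def Claim_equal_f : Prop := ∀ (x : Int) (end_ : Int), Dom_f x end_ → Pre_f x end_ → Spec_f x end_ (f x end_)

-- ===== LEMMAS AND PROOFS =====

-- reference function: the common value of both programs on Pre_f, by well-founded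
-- recursion on (end_ - x).toNat (the 'x < 2' branch is never reached on Pre_f).
def F (x : Int) (end_ : Int) : Int :=
  if _h1 : end_ < x then 0
  else if _h2 : x = 11 then 0
  else if _h3 : x = end_ then 1
  else if _h4 : x < 2 then 0
  else F (x + 1) end_ + F (x * 2) end_ + F (x * x) end_
termination_by (end_ - x).toNat
decreasing_by
  · omega
  · have : x + 1 ≤ x * 2 := by nlinarith
    omega
  · have : x + 1 ≤ x * x := by nlinarith
    omega

lemma F_of_gt (x end_ : Int) (h : end_ < x) : F x end_ = 0 := by
  rw [F]; simp [h]

lemma fGoA_eq_F (end_ : Int) :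
    ∀ (fuel : Nat) (x : Int), (end_ - x).toNat < fuel → Pre_f x end_ →
      fGoA fuel x end_ = F x end_ := by
  intro fuel
  induction fuel with
  | zero => intro x h _; omega
  | succ n ih =>
    intro x hf hp
    rw [F]
    simp only [fGoA]
    by_cases h1 : x > end_
    · simp [h1]
    · simp only [h1, if_false]
      by_cases h2 : x = 11
      · simp [h2]
      · simp only [h2, if_false]
        by_cases h3 : x = end_
        · simp [h3]
        · have hx2 : 2 ≤ x := by rcases hp with h | h <;> omega
          have hlt : x < end_ := by omega
          have hsq : x + 1 ≤ x * x := by nlinarith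
          have hdb : x + 1 ≤ x * 2 := by nlinarith
          simp only [h3, if_false, if_neg (show ¬ x < 2 by omega)]
          have e1 := ih (x + 1) (by omega) (Or.inl (by omega))
          have e2 := ih (x * 2) (by omega) (Or.inl (by omega))
          have e3 := ih (x * x) (by omega) (Or.inl (by omega))
          rw [show x ^ 2 = x * x from sq x, e1, e2, e3]
          simp [show ¬ x < 2 from by omega]

-- reading position k of the dp array through its known contents
lemma getBang_of_toList {a : Array Int} {L : List Int} (h : a.toList = L) (k : Nat) :
    a[k]! = L[k]! := by
  have : a = L.toArray := by rw [← h, Array.toArray_toList]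
  rw [this, List.getElem!_toArray]

lemma getBang_map_range (n k : Nat) (g : Nat → Int) (h : k < n) :
    ((List.range n).map g)[k]! = g k := by
  simp [List.getElem!_eq_getElem?_getD, List.getElem?_map, List.getElem?_range h]

-- the DP loop invariant: after i = 0 … n-1 the array holds F (end_ - i) at position i.
-- (needs end_ - i ≥ 2 for every processed i ≥ 1, i.e. n ≤ 1 or n ≤ end_ - 1)
lemma build_inv (end_ : Int) (n : Nat) (hn : n ≤ 1 ∨ (n : Int) ≤ end_ - 1) :
    ((List.range n).foldl (fAltStep end_) #[]).toList
      = List.map (fun i : Nat => F (end_ - (i : Int)) end_) (List.range n) := by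
  induction n with
  | zero => simp
  | succ m ih =>
    have hm : m ≤ 1 ∨ (m : Int) ≤ end_ - 1 := by
      rcases hn with h | h
      · left; omega
      · right; push_cast at h ⊢; omega
    have hA := ih hm
    rw [List.range_succ, List.foldl_append, List.foldl_cons, List.foldl_nil,
      List.map_append, List.map_cons, List.map_nil]
    set A := (List.range m).foldl (fAltStep end_) #[] with hAdef
    simp only [fAltStep]
    rw [Array.toList_push, hA]
    congr 1
    rcases Nat.eq_zero_or_pos m with hm0 | hm1
    · subst hm0
      rw [F]
      by_cases h11 : end_ - ((0 : Nat) : Int) = 11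
      · simp only [if_pos h11]
        simp [show end_ = (11 : Int) from by omega]
      · simp only [if_neg h11, if_pos rfl]
        push_cast at h11 ⊢
        simp [h11]
        omega
    · -- m ≥ 1: the value v = end_ - m satisfies 2 ≤ v < end_
      have hv2 : 2 ≤ end_ - (m : Int) := by
        rcases hn with h | h
        · omega
        · push_cast at h; omega
      set v : Int := end_ - (m : Int) with hv
      have hvlt : v < end_ := by omega
      by_cases h11 : v = 11
      · rw [if_pos h11, F]
        simp [h11, show ¬ end_ < (11 : Int) from by omega]
      · rw [if_neg h11, if_neg (by omega : ¬ m = 0)]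
        have hsq : v + 1 ≤ v * v := by nlinarith
        have hdb : v + 1 ≤ v * 2 := by nlinarith
        have g1 : A[m - 1]! = F (v + 1) end_ := by
          rw [getBang_of_toList hA, getBang_map_range m (m - 1) _ (by omega)]
          congr 1
          push_cast [Nat.cast_sub (by omega : 1 ≤ m)]
          omega
        have g2 : (if v < v * 2 ∧ v * 2 ≤ end_
              then A[(end_ - v * 2).toNat]! else 0)
            = F (v * 2) end_ := by
          by_cases c : v * 2 ≤ end_
          · rw [if_pos ⟨by omega, c⟩, getBang_of_toList hA,
              getBang_map_range m _ _ (by omega), show end_ - ((end_ - v * 2).toNat : Int) = v * 2 from by omega]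
          · rw [if_neg (by omega), F_of_gt _ _ (by omega)]
        have g3 : (if v < v * v ∧ v * v ≤ end_
              then A[(end_ - v * v).toNat]! else 0)
            = F (v * v) end_ := by
          by_cases c : v * v ≤ end_
          · rw [if_pos ⟨by omega, c⟩, getBang_of_toList hA,
              getBang_map_range m _ _ (by omega), show end_ - ((end_ - v * v).toNat : Int) = v * v from by omega]
          · rw [if_neg (by omega), F_of_gt _ _ (by omega)]
        have hFv : F v end_ = F (v + 1) end_ + F (v * 2) end_ + F (v * v) end_ := by
          rw [F, dif_neg (show ¬ end_ < v by omega), dif_neg h11,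
            dif_neg (show ¬ v = end_ by omega), dif_neg (show ¬ v < 2 by omega)]
        rw [g1, g2, g3, ← hFv]

lemma f_alt_eq_F (x end_ : Int) (hp : Pre_f x end_) : f_alt x end_ = F x end_ := by
  unfold f_alt fAltDP
  by_cases h1 : x > end_
  · rw [if_pos h1, F_of_gt _ _ h1]
  · rw [if_neg h1]
    by_cases h3 : x = end_
    · subst h3
      have hn : (x - x + 1).toNat = 1 := by omega
      rw [hn, getBang_of_toList (build_inv x 1 (Or.inl (le_refl 1))),
        show (x - x).toNat = 0 from by omega,
        getBang_map_range 1 0 _ (by omega)]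
      simp
    · have hx2 : 2 ≤ x := by rcases hp with h | h <;> omega
      have hxe : x < end_ := by omega
      rw [getBang_of_toList (build_inv end_ (end_ - x + 1).toNat (Or.inr (by omega))),
        getBang_map_range _ _ _ (by omega),
        show end_ - (((end_ - x).toNat : Nat) : Int) = x from by omega]

-- ===== VERDICT (by name: the statement is the Claim_ definition above) =====
theorem f_spec : Claim_equal_f := by
  intro x end_ _ hp
  unfold Spec_f f
  rw [fGoA_eq_F end_ _ x (by omega) hp, f_alt_eq_F x end_ hp]
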